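-- pv_equiv track=rewrite | github.com/rpmcdougall/Bioinformatics | Finding_Hidden_Messages_In_DNA/Week 2/genome_skew.py | genome_skew_max
-- ===== SOURCE A (Python) =====
-- def genome_skew_max(genome):
--     minimum_skew = []
--     skew_plot = []
--     skew_map = {'A': 0, 'T': 0, 'G': 1, 'C': -1}
--     skew_plot.append(0)
--     skew_value = 0
--     for i in range(1, len(genome)):
--         skew_value += skew_map.get(genome[i])
--         skew_plot.append(skew_value)
--
--     minimum = max(skew_plot)
--     for i in range(0, len(skew_plot)):
--         if skew_plot[i] == minimum:
--             minimum_skew.append(i + 1)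
--
--     return minimum_skew
-- ===== SOURCE B (Python) =====
-- def genome_skew_max(genome):
--     # One fused left-to-right pass: running skew + running maximum + current argmax positions.
--     skew_map = {'A': 0, 'T': 0, 'G': 1, 'C': -1}
--     skew = 0
--     best = 0
--     positions = [1]
--     for i in range(1, len(genome)):
--         skew += skew_map.get(genome[i])
--         if skew > best:
--             best = skew
--             positions = [i + 1]
--         elif skew == best:
--             positions.append(i + 1)
--     return positions
-- ===== Notes on version B (the rewrite author's own statement) =====
-- stated objective: simpler
-- what changed: A builds the whole skew-plot list, then calls max over it, then scans it again collecting argmax indices; B does a single fused pass keeping only the running skew, the running maximum and the current list of argmax positions, never materializing the plot.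
import Mathlib
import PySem

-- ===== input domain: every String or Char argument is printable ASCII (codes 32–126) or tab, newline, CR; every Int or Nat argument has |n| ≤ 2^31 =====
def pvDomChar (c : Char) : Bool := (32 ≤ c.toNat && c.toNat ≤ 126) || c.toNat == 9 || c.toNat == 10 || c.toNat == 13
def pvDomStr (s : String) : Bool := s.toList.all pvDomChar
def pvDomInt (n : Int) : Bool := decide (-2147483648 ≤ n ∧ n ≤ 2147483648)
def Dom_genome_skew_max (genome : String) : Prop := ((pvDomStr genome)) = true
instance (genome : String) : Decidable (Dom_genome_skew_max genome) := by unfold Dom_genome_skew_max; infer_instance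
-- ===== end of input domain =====

-- B fuses A's three passes (build skew plot, take max, collect argmax positions) into one
-- running-max traversal; equal return values on all genomes whose chars past index 0 are ACGT.

-- the literal dict {'A':0,'T':0,'G':1,'C':-1} both sources define (hoisted constant)
def pvSkewMap : PySem.Dict Char Int :=
  PySem.Dict.ofList [('A', 0), ('T', 0), ('G', 1), ('C', -1)]

-- ===== PORT A =====

def genome_skew_max (genome : String) : List Int :=
  -- for i in range(1, len(genome)): skew_value += skew_map.get(genome[i]); skew_plot.append(skew_value)
  -- skew_map.get(c) is None outside {A,T,G,C} and Python raises TypeError: Pre_ excludes that, so .getD 0 is never taken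
  let st := (genome.toList.drop 1).foldl
    (fun (st : List Int × Int) c =>
      let sv := st.2 + (PySem.Dict.get? pvSkewMap c).getD 0
      (st.1 ++ [sv], sv)) ([0], 0)
  -- minimum = max(skew_plot); the plot starts with 0 so it is nonempty and .getD 0 is never the default
  let minimum := (PySem.List.max? st.1 (fun y => y)).getD 0
  -- for i in range(0, len(skew_plot)): if skew_plot[i] == minimum: append(i+1)
  (PySem.List.enumerate st.1 0).foldl
    (fun acc (p : Int × Int) => if p.2 = minimum then acc ++ [p.1 + 1] else acc) []

-- ===== PORT B =====

def genome_skew_max_alt (genome : String) : List Int :=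
  -- state (skew, best, positions); .getD 0 never taken inside Pre_ (Python raises there)
  ((PySem.List.enumerate (genome.toList.drop 1) 1).foldl
    (fun (st : Int × Int × List Int) (p : Int × Char) =>
      let sv := st.1 + (PySem.Dict.get? pvSkewMap p.2).getD 0
      if sv > st.2.1 then (sv, sv, [p.1 + 1])
      else if sv = st.2.1 then (sv, st.2.1, st.2.2 ++ [p.1 + 1])
      else (sv, st.2.1, st.2.2)) (0, 0, [1])).2.2

-- ===== PRECONDITION & SPEC =====
-- Pre_ excludes genomes with a character other than A/C/G/T at an index ≥ 1: there
-- skew_map.get returns None and Python A (and B alike) raises TypeError.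
def Pre_genome_skew_max (genome : String) : Prop :=
  ((genome.toList.drop 1).all (fun c => c == 'A' || c == 'T' || c == 'G' || c == 'C')) = true
instance (genome : String) : Decidable (Pre_genome_skew_max genome) := by
  unfold Pre_genome_skew_max; infer_instance

def pvWitness_genome_skew_max : String := "ACGT"

def Spec_genome_skew_max (genome : String) (out : List Int) : Prop := out = genome_skew_max_alt genome
instance (genome : String) (out : List Int) : Decidable (Spec_genome_skew_max genome out) := by unfold Spec_genome_skew_max; infer_instance

-- ===== CLAIM (what is proved, stated in full; the proofs are below) =====
def Claim_equal_genome_skew_max : Prop := ∀ (genome : String), Dom_genome_skew_max genome → Pre_genome_skew_max genome → Spec_genome_skew_max genome (genome_skew_max genome)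

-- ===== LEMMAS AND PROOFS =====

-- per-character skew increment, as both ports compute it
def pvVal (c : Char) : Int := (PySem.Dict.get? pvSkewMap c).getD 0

-- the skew plot past the leading 0: running prefix sums starting from s
def pvSums (s : Int) : List Char → List Int
  | [] => []
  | c :: cs => (s + pvVal c) :: pvSums (s + pvVal c) cs

-- final skew value (second component of A's first fold)
def pvEnd (s : Int) : List Char → Int
  | [] => s
  | c :: cs => pvEnd (s + pvVal c) cs

-- positions (1-based at p) of entries equal to m
def pvCollect (m : Int) : List Int → Int → List Int
  | [], _ => []
  | x :: xs, p => (if x = m then [p] else []) ++ pvCollect m xs (p + 1)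

theorem pvFoldA (cs : List Char) (acc : List Int) (s : Int) :
    cs.foldl (fun (st : List Int × Int) c =>
      let sv := st.2 + (PySem.Dict.get? pvSkewMap c).getD 0
      (st.1 ++ [sv], sv)) (acc, s) = (acc ++ pvSums s cs, pvEnd s cs) := by
  induction cs generalizing acc s with
  | nil => simp [pvSums, pvEnd]
  | cons c cs ih =>
    simp only [List.foldl_cons, pvSums, pvEnd]
    rw [ih]
    simp [pvVal]

theorem pvFoldCollect (l : List Int) (m : Int) (j : Int) (acc : List Int) :
    (PySem.List.enumerate l j).foldl
      (fun acc (p : Int × Int) => if p.2 = m then acc ++ [p.1 + 1] else acc) acc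
    = acc ++ pvCollect m l (j + 1) := by
  induction l generalizing j acc with
  | nil => simp [PySem.List.enumerate_nil, pvCollect]
  | cons x xs ih =>
    rw [PySem.List.enumerate_cons, List.foldl_cons, ih, pvCollect]
    by_cases h : x = m <;> simp [h, add_comm]

def pvStepBFree (st : Int × Int × List Int) (p : Int × Char) : Int × Int × List Int :=
  if st.1 + pvVal p.2 > st.2.1 then (st.1 + pvVal p.2, st.1 + pvVal p.2, [p.1 + 1])
  else if st.1 + pvVal p.2 = st.2.1 then (st.1 + pvVal p.2, st.2.1, st.2.2 ++ [p.1 + 1])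
  else (st.1 + pvVal p.2, st.2.1, st.2.2)

theorem pvFoldB_free (cs : List Char) (j s b : Int) (ps : List Int) :
    ((PySem.List.enumerate cs j).foldl pvStepBFree (s, b, ps)).2.2
    = (if b = (pvSums s cs).foldl max b then ps else [])
      ++ pvCollect ((pvSums s cs).foldl max b) (pvSums s cs) (j + 1) := by
  induction cs generalizing j s b ps with
  | nil => simp [PySem.List.enumerate_nil, pvSums, pvCollect]
  | cons c cs ih =>
    rw [PySem.List.enumerate_cons, List.foldl_cons]
    have hstep : pvStepBFree (s, b, ps) (j, c)
        = if s + pvVal c > b then (s + pvVal c, s + pvVal c, [j + 1])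
          else if s + pvVal c = b then (s + pvVal c, b, ps ++ [j + 1])
          else (s + pvVal c, b, ps) := rfl
    rw [hstep]
    simp only [pvSums, List.foldl_cons]
    by_cases h1 : s + pvVal c > b
    · have hmax : max b (s + pvVal c) = s + pvVal c := max_eq_right (le_of_lt h1)
      rw [if_pos h1]
      simp only [hmax]
      rw [ih, pvCollect]
      have hle : s + pvVal c ≤ (pvSums (s + pvVal c) cs).foldl max (s + pvVal c) :=
        (PySem.List.le_foldl_max _ _).1
      have hbne : b ≠ (pvSums (s + pvVal c) cs).foldl max (s + pvVal c) := by omega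
      simp [hbne]
    · have hmax : max b (s + pvVal c) = b := max_eq_left (by omega)
      rw [if_neg h1]
      simp only [hmax]
      by_cases h2 : s + pvVal c = b
      · rw [if_pos h2, ih, pvCollect, h2]
        by_cases hb : b = (pvSums b cs).foldl max b
        · simp only [if_pos hb]; simp
        · simp only [if_neg hb]; simp
      · rw [if_neg h2, ih, pvCollect]
        have hle : b ≤ (pvSums (s + pvVal c) cs).foldl max b := (PySem.List.le_foldl_max _ _).1
        have hne : s + pvVal c ≠ (pvSums (s + pvVal c) cs).foldl max b := by omega
        simp [hne]

-- the port's let-binding lambda is definitionally pvStepBFree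
theorem pvFoldB (cs : List Char) (j s b : Int) (ps : List Int) :
    ((PySem.List.enumerate cs j).foldl
      (fun (st : Int × Int × List Int) (p : Int × Char) =>
        let sv := st.1 + (PySem.Dict.get? pvSkewMap p.2).getD 0
        if sv > st.2.1 then (sv, sv, [p.1 + 1])
        else if sv = st.2.1 then (sv, st.2.1, st.2.2 ++ [p.1 + 1])
        else (sv, st.2.1, st.2.2)) (s, b, ps)).2.2
    = (if b = (pvSums s cs).foldl max b then ps else [])
      ++ pvCollect ((pvSums s cs).foldl max b) (pvSums s cs) (j + 1) :=
  pvFoldB_free cs j s b ps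

-- ===== VERDICT (by name: the statement is the Claim_ definition above) =====
theorem genome_skew_max_spec : Claim_equal_genome_skew_max := by
  intro genome _ _
  unfold Spec_genome_skew_max genome_skew_max genome_skew_max_alt
  rw [pvFoldCollect, pvFoldB, pvFoldA]
  simp only [List.singleton_append, PySem.List.max?_id_cons, Option.getD_some]
  rw [pvCollect]
  norm_num
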